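-- pv_equiv track=rewrite | github.com/Karaage-Cluster/python-tldap | tldap/dn.py | _hexstring
-- ===== SOURCE A (Python) =====
-- def _isHEX(char):
--     assert len(char) == 1
--     return (char >= '0' and char <= '9') \
--         or (char >= 'A' and char <= 'F') \
--         or (char >= 'a' and char <= 'f')
--
-- def _isSHARP(char):
--     assert len(char) == 1
--     return char == '#'
--
-- def _hexstring(value, i):
--     start = i
--     result = ""
--
--     if i >= len(value):
--         return (None, start)
--
--     if not _isSHARP(value[i]):
--         return (None, start)
--     i = i + 1
--
--     (hexpair, i) = _hexpair(value, i)
--     if hexpair is None: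
--         return (None, start)
--     result += hexpair
--
--     while True:
--         (hexpair, i) = _hexpair(value, i)
--         if hexpair is None:
--             return (result, i)
--         result += hexpair
--
-- def _hexpair(value, i):
--     start = i
--
--     if i >= len(value):
--         return (None, start)
--     if not _isHEX(value[i]):
--         return (None, start)
--     i = i + 1
--
--     if i >= len(value):
--         return (None, start)
--     if not _isHEX(value[i]):
--         return (None, start)
--     i = i + 1
--
--     return (chr(int(value[start:i], 16)), i)
-- ===== SOURCE B (Python) =====
-- def _is_hex(c):
--     return '0' <= c <= '9' or 'A' <= c <= 'F' or 'a' <= c <= 'f'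
--
-- def _hex_digit(c):
--     o = ord(c)
--     if o >= 97:
--         return o - 87
--     if o >= 65:
--         return o - 55
--     return o - 48
--
-- def _hexstring(value, i):
--     if i >= len(value) or value[i] != '#':
--         return (None, i)
--     run = []
--     for c in value[i + 1:]:
--         if not _is_hex(c):
--             break
--         run.append(c)
--     npairs = len(run) // 2
--     if npairs == 0:
--         return (None, i)
--     out = []
--     pairs = run[:2 * npairs]
--     while pairs:
--         out.append(chr(_hex_digit(pairs[0]) * 16 + _hex_digit(pairs[1])))
--         pairs = pairs[2:]
--     return ("".join(out), i + 1 + 2 * npairs)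
-- ===== Notes on version B (the rewrite author's own statement) =====
-- stated objective: alternative
-- what changed: A interleaves parsing and decoding by repeatedly calling _hexpair (each call re-slicing and running int(...,16)); B first scans the maximal hex run after '#', takes the even-length prefix, then decodes it pair by pair with arithmetic on digit values, no slicing/int-parsing per pair.
-- outside the precondition, e.g. on _hexstring('#zz', -3): A returns (None, -3), B returns (None, -3); on _hexstring('#41', -3): A raises ValueError, B returns ('A', 0)
import Mathlib
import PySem

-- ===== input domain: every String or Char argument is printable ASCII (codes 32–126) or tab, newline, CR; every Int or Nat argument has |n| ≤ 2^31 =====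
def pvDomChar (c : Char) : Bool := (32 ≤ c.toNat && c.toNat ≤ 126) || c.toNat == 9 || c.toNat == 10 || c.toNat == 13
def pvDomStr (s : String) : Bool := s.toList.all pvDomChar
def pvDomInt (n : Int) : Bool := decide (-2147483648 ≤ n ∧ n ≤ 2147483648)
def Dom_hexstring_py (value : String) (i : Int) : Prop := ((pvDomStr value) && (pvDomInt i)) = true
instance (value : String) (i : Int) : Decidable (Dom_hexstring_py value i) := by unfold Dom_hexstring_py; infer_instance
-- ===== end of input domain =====

-- B replaces A's repeated _hexpair parse-and-decode calls (slice + int(...,16) per pair) by an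
-- extent scan of the maximal hex run after '#' followed by pairwise digit-arithmetic decoding;
-- objective: alternative structure, same cost.

-- ===== PORT A =====
def isHEX_A (c : Char) : Bool :=
  ('0' ≤ c && c ≤ '9') || ('A' ≤ c && c ≤ 'F') || ('a' ≤ c && c ≤ 'f')

-- hand port of int(s, 16) for the slice A feeds it (exact there: inside Pre_ the reached slice
-- is a nonempty string of hex digits, with no sign/whitespace/prefix/underscore)
def hexDigitVal (c : Char) : Int :=
  if '0' ≤ c ∧ c ≤ '9' then (c.toNat : Int) - 48
  else if 'A' ≤ c ∧ c ≤ 'F' then (c.toNat : Int) - 55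
  else (c.toNat : Int) - 87

def intOfHex (cs : List Char) : Int := cs.foldl (fun a c => a * 16 + hexDigitVal c) 0

-- _hexpair(value, i): the result char (as a 1-char list) and the new index
def hexpair_py (l : List Char) (i : Int) : Option (List Char) × Int :=
  let start := i
  if (l.length : Int) ≤ i then (none, start)
  else
    match PySem.List.pyGet? l i with
    | none => (none, start)          -- IndexError; unreachable for 0 ≤ i
    | some c =>
      if ¬ isHEX_A c then (none, start)
      else
        let i := i + 1
        if (l.length : Int) ≤ i then (none, start)
        else
          match PySem.List.pyGet? l i with
          | none => (none, start)    -- IndexError; unreachable for 0 ≤ i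
          | some c2 =>
            if ¬ isHEX_A c2 then (none, start)
            else
              let i := i + 1
              (some [Char.ofNat (intOfHex (PySem.List.slice l (some start) (some i))).toNat], i)

-- the 'while True' loop of _hexstring (fuel = len + 1 is never exhausted for 0 ≤ i)
def loopA (l : List Char) : Nat → Int → List Char → List Char × Int
  | 0, i, acc => (acc, i)
  | fuel + 1, i, acc =>
    match hexpair_py l i with
    | (none, i') => (acc, i')
    | (some r, i') => loopA l fuel i' (acc ++ r)

def hexstring_py (value : String) (i : Int) : Option String × Int :=
  let l := value.toList
  let start := i
  if (l.length : Int) ≤ i then (none, start)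
  else
    match PySem.List.pyGet? l i with
    | none => (none, start)          -- IndexError; unreachable for 0 ≤ i
    | some c =>
      if ¬ (c = '#') then (none, start)
      else
        match hexpair_py l (i + 1) with
        | (none, _) => (none, start)
        | (some r, i1) =>
          let (res, i2) := loopA l (l.length + 1) i1 r
          (some (String.ofList res), i2)

-- ===== PORT B =====
def isHexB (c : Char) : Bool :=
  ('0' ≤ c && c ≤ '9') || ('A' ≤ c && c ≤ 'F') || ('a' ≤ c && c ≤ 'f')

def hexDigitB (c : Char) : Int :=
  let o : Int := c.toNat
  if 97 ≤ o then o - 87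
  else if 65 ≤ o then o - 55
  else o - 48

-- the 'for c in value[i+1:]: … break' run collector
def hexRunB : List Char → List Char
  | [] => []
  | c :: cs => if isHexB c then c :: hexRunB cs else []

-- the 'while pairs:' decoder (called on an even-length list)
def decodeB : List Char → List Char
  | a :: b :: rest => Char.ofNat (hexDigitB a * 16 + hexDigitB b).toNat :: decodeB rest
  | _ => []

def hexstring_py_alt (value : String) (i : Int) : Option String × Int :=
  let l := value.toList
  if (l.length : Int) ≤ i ∨ PySem.List.pyGet? l i ≠ some '#' then (none, i)
  else
    let run := hexRunB (PySem.List.slice l (some (i + 1)) none)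
    let npairs := run.length / 2
    if npairs = 0 then (none, i)
    else (some (String.ofList (decodeB (run.take (2 * npairs)))), i + 1 + 2 * (npairs : Int))

-- ===== PRECONDITION & SPEC =====
-- Pre_ excludes negative i: there Python's negative-index wraparound makes A's behaviour an
-- accident of the implementation — on most such inputs A raises (IndexError on the wrapped
-- lookup, or ValueError from int('', 16) when the slice crosses position 0), and where it
-- returns, the wrapped-index result is an artefact no caller relies on.
def Pre_hexstring_py (value : String) (i : Int) : Prop := 0 ≤ i
instance (value : String) (i : Int) : Decidable (Pre_hexstring_py value i) := by unfold Pre_hexstring_py; infer_instance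

def pvWitness_hexstring_py : String × Int := ("#4142", 0)

def Spec_hexstring_py (value : String) (i : Int) (out : Option String × Int) : Prop := out = hexstring_py_alt value i
instance (value : String) (i : Int) (out : Option String × Int) : Decidable (Spec_hexstring_py value i out) := by unfold Spec_hexstring_py; infer_instance

-- ===== CLAIM (what is proved, stated in full; the proofs are below) =====
def Claim_equal_hexstring_py : Prop := ∀ (value : String) (i : Int), Dom_hexstring_py value i → Pre_hexstring_py value i → Spec_hexstring_py value i (hexstring_py value i)

-- ===== LEMMAS AND PROOFS =====

-- A's and B's hex tests are the same function
theorem isHexB_eq : isHexB = isHEX_A := rfl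

theorem digit_eq (c : Char) (h : isHEX_A c = true) : hexDigitVal c = hexDigitB c := by
  simp only [isHEX_A, Bool.or_eq_true, Bool.and_eq_true, decide_eq_true_eq,
    Char.le_def, UInt32.le_iff_toNat_le] at h
  simp only [hexDigitVal, hexDigitB, Char.le_def, UInt32.le_iff_toNat_le, Char.toNat]
  simp only [show '0'.val.toNat = 48 from rfl, show '9'.val.toNat = 57 from rfl,
    show 'A'.val.toNat = 65 from rfl, show 'F'.val.toNat = 70 from rfl,
    show 'a'.val.toNat = 97 from rfl, show 'f'.val.toNat = 102 from rfl] at h ⊢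
  split_ifs <;> omega

set_option maxRecDepth 4000 in
theorem hexpair_char (l : List Char) (n : Nat) :
    hexpair_py l (n : Int) =
      match l.drop n with
      | a :: b :: _ =>
        if isHEX_A a && isHEX_A b
        then (some [Char.ofNat (hexDigitVal a * 16 + hexDigitVal b).toNat], (n : Int) + 2)
        else (none, (n : Int))
      | _ => (none, (n : Int)) := by
  have hget : ∀ m : Nat, PySem.List.pyGet? l ((m : Nat) : Int) = l[m]? := fun m =>
    PySem.List.pyGet?_natCast l m
  rcases hd : l.drop n with _ | ⟨a, rest⟩
  · -- drop empty: l.length ≤ n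
    have hlen : l.length ≤ n := by
      by_contra hc
      have := List.drop_eq_nil_iff.mp hd
      omega
    simp [hexpair_py, show ((l.length : Int) ≤ (n:Int)) from by exact_mod_cast hlen]
  · have hlt : n < l.length := by
      have := congrArg List.length hd
      simp at this; omega
    have ha : l[n]? = some a := by
      have : (l.drop n)[0]? = some a := by simp [hd]
      simpa [List.getElem?_drop] using this
    rcases hrest : rest with _ | ⟨b, rest2⟩
    · -- exactly one char left
      have hlen1 : l.length = n + 1 := by
        have := congrArg List.length hd
        simp [hrest] at this; omega
      by_cases hha : isHEX_A a
      · simp [hexpair_py, hget, ha, hha, hlen1]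
      · simp [hexpair_py, hget, ha, hha, hlen1, show ¬((n:Int)+1 ≤ (n:Int)) from by omega]
    · have hb : l[n+1]? = some b := by
        have : (l.drop n)[1]? = some b := by simp [hd, hrest]
        simpa [List.getElem?_drop] using this
      have hlt2 : n + 1 < l.length := (List.getElem?_eq_some_iff.mp hb).1
      have hget1 : PySem.List.pyGet? l ((n:Int)+1) = some b := by
        rw [show ((n:Int)+1) = (((n+1 : Nat)) : Int) from by push_cast; ring,
          PySem.List.pyGet?_natCast, hb]
      by_cases hha : isHEX_A a
      · by_cases hhb : isHEX_A b
        · have hslice : PySem.List.slice l (some (n:Int)) (some (2 + (n:Int))) = [a, b] := by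
            have h2 : PySem.List.slice l (some (n:Int)) (some (2 + (n:Int))) = (l.drop n).take 2 := by
              have := PySem.List.slice_natCast (xs := l) (a := n) (b := n + 2)
              simpa [show ((n + 2 : Nat) : Int) = 2 + (n:Int) from by push_cast; ring] using this
            rw [h2, hd, hrest]
            rfl
          simp [hexpair_py, hget, ha, hget1, hha, hhb, hslice, intOfHex,
            show ¬((l.length:Int) ≤ (n:Int)) from by exact_mod_cast (by omega : ¬(l.length ≤ n)),
            show ¬((l.length:Int) ≤ (n:Int)+1) from by push_cast; omega]
          refine ⟨?_, by ring⟩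
          rw [show ((n:Int) + 1 + 1) = 2 + (n:Int) from by ring, hslice]
          simp only [List.foldl]
          congr 2
          ring
        · simp [hexpair_py, hget, ha, hget1, hha, hhb,
            show ¬((l.length:Int) ≤ (n:Int)) from by push_cast; omega,
            show ¬((l.length:Int) ≤ (n:Int)+1) from by push_cast; omega]
      · simp [hexpair_py, hget, ha, hha,
          show ¬((l.length:Int) ≤ (n:Int)) from by push_cast; omega]

theorem loopA_spec (l : List Char) (fuel : Nat) : ∀ (n : Nat) (acc : List Char),
    l.length ≤ n + 2 * fuel →
    loopA l fuel (n : Int) acc =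
      (acc ++ decodeB ((hexRunB (l.drop n)).take (2 * ((hexRunB (l.drop n)).length / 2))),
       (n : Int) + 2 * (((hexRunB (l.drop n)).length / 2 : Nat) : Int)) := by
  induction fuel with
  | zero =>
    intro n acc hle
    have hd : l.drop n = [] := List.drop_eq_nil_of_le (by omega)
    simp [loopA, hd, hexRunB, isHexB_eq, decodeB]
  | succ fuel ih =>
    intro n acc hle
    rw [loopA, hexpair_char]
    rcases hd : l.drop n with _ | ⟨a, rest⟩
    · simp [hexRunB, isHexB_eq, decodeB]
    · rcases hrest : rest with _ | ⟨b, rest2⟩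
      · -- single char
        rcases hha : isHEX_A a <;>
          simp [hexRunB, isHexB_eq, hha, decodeB]
      · by_cases hha : isHEX_A a
        · by_cases hhb : isHEX_A b
          · -- success: recurse
            have hd2 : l.drop (n + 2) = rest2 := by
              have : l.drop (n + 2) = (l.drop n).drop 2 := by
                rw [List.drop_drop]
              rw [this, hd, hrest]; rfl
            have hrw : ((n : Int) + 2) = ((n + 2 : Nat) : Int) := by push_cast; ring
            simp only [hha, hhb, Bool.and_self, if_pos]
            rw [hrw, ih (n + 2) _ (by omega)]
            rw [hd2]
            simp only [hexRunB, isHexB_eq, hha, hhb, if_pos]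
            have hlen : (a :: b :: hexRunB rest2).length = (hexRunB rest2).length + 2 := by
              simp
            rw [hlen]
            have hdiv : ((hexRunB rest2).length + 2) / 2 = (hexRunB rest2).length / 2 + 1 := by
              omega
            rw [hdiv]
            have htake : (a :: b :: hexRunB rest2).take (2 * ((hexRunB rest2).length / 2 + 1)) =
                a :: b :: (hexRunB rest2).take (2 * ((hexRunB rest2).length / 2)) := by
              rw [show 2 * ((hexRunB rest2).length / 2 + 1) = (2 * ((hexRunB rest2).length / 2) + 1) + 1 by ring]
              simp [List.take_succ_cons]
            rw [htake]
            have hdec : decodeB (a :: b :: (hexRunB rest2).take (2 * ((hexRunB rest2).length / 2))) =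
                Char.ofNat (hexDigitB a * 16 + hexDigitB b).toNat ::
                  decodeB ((hexRunB rest2).take (2 * ((hexRunB rest2).length / 2))) := rfl
            rw [hdec]
            simp only [Prod.mk.injEq]
            exact ⟨by simp [digit_eq a hha, digit_eq b hhb], by push_cast; ring⟩
          · simp [hexRunB, isHexB_eq, hha, hhb, decodeB,
              show (1:Nat)/2 = 0 from rfl]
        · simp [hexRunB, isHexB_eq, hha, decodeB]

theorem main (value : String) (i : Int) (hpre : 0 ≤ i) :
    hexstring_py value i = hexstring_py_alt value i := by
  obtain ⟨n, rfl⟩ := Int.eq_ofNat_of_zero_le hpre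
  by_cases hlen : value.toList.length ≤ n
  · have h' : value.length ≤ n := by simpa using hlen
    simp [hexstring_py, hexstring_py_alt, h']
  · have hnl : ¬ ((value.toList.length : Int) ≤ (n : Int)) := by
      exact_mod_cast hlen
    have hlt : n < value.toList.length := Nat.not_le.mp hlen
    have ha : PySem.List.pyGet? value.toList (n : Int) = some value.toList[n] := by
      rw [PySem.List.pyGet?_natCast]
      exact List.getElem?_eq_getElem hlt
    by_cases hsharp : value.toList[n] = '#'
    · have hslice : PySem.List.slice value.toList (some ((n : Int) + 1)) none
          = value.toList.drop (n + 1) := by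
        rw [PySem.List.slice_from _ (by omega), show ((n:Int)+1).toNat = n + 1 from by omega]
      have hrw1 : ((n : Int) + 1) = ((n + 1 : Nat) : Int) := by push_cast; ring
      rcases hd : value.toList.drop (n + 1) with _ | ⟨a, rest⟩
      · have hpair : hexpair_py value.toList ((n:Int)+1) = (none, ((n+1:Nat) : Int)) := by
          rw [hrw1, hexpair_char, hd]
        simp [hexstring_py, hexstring_py_alt, hnl, ha, hsharp, hslice, hd, hpair, hexRunB, isHexB_eq]
      · rcases hrest : rest with _ | ⟨b, rest2⟩
        · have hpair : hexpair_py value.toList ((n:Int)+1) = (none, ((n+1:Nat) : Int)) := by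
            rw [hrw1, hexpair_char, hd, hrest]
          rcases hha : isHEX_A a <;>
            simp [hexstring_py, hexstring_py_alt, hnl, ha, hsharp, hslice, hd, hrest, hpair,
              hexRunB, isHexB_eq, hha]
        · subst hrest
          by_cases hha : isHEX_A a
          · by_cases hhb : isHEX_A b
            · -- two hex digits follow: both sides produce output
              have hpair : hexpair_py value.toList ((n:Int)+1)
                  = (some [Char.ofNat (hexDigitVal a * 16 + hexDigitVal b).toNat],
                     ((n+1:Nat) : Int) + 2) := by
                rw [hrw1, hexpair_char, hd]
                simp [hha, hhb]
              have hd3 : value.toList.drop (n + 3) = rest2 := by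
                have h1 : value.toList.drop (n + 3) = (value.toList.drop (n+1)).drop 2 := by
                  rw [List.drop_drop]
                rw [h1, hd]
                rfl
              have hloop := loopA_spec value.toList (value.toList.length + 1) (n + 3)
                [Char.ofNat (hexDigitVal a * 16 + hexDigitVal b).toNat] (by omega)
              rw [hd3] at hloop
              simp only [hexstring_py, hexstring_py_alt, hnl, ha, hsharp, hslice, hd, hpair,
                if_neg, ite_false, ite_true, not_true, not_false_iff, Option.some.injEq]
              rw [show ((n+1:Nat):Int) + 2 = ((n+3:Nat):Int) from by push_cast; ring]
              rw [hloop]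
              set k2 := (hexRunB rest2).length / 2 with hk2
              have hrun : hexRunB (a :: b :: rest2) = a :: b :: hexRunB rest2 := by
                simp [hexRunB, isHexB_eq, hha, hhb]
              rw [hrun]
              have hlen2 : (a :: b :: hexRunB rest2).length = (hexRunB rest2).length + 2 := by
                simp
              rw [hlen2]
              have hdiv : ((hexRunB rest2).length + 2) / 2 = k2 + 1 := by omega
              rw [hdiv]
              have htake : (a :: b :: hexRunB rest2).take (2 * (k2 + 1)) =
                  a :: b :: (hexRunB rest2).take (2 * k2) := by
                rw [show 2 * (k2 + 1) = (2 * k2 + 1) + 1 by ring]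
                simp [List.take_succ_cons]
              rw [htake]
              have hdec : decodeB (a :: b :: (hexRunB rest2).take (2 * k2)) =
                  Char.ofNat (hexDigitB a * 16 + hexDigitB b).toNat ::
                    decodeB ((hexRunB rest2).take (2 * k2)) := rfl
              rw [hdec]
              rw [if_neg (by simp), Prod.mk.injEq]
              refine ⟨?_, by push_cast; ring⟩
              simp [digit_eq a hha, digit_eq b hhb]
            · have hpair : hexpair_py value.toList ((n:Int)+1) = (none, ((n+1:Nat) : Int)) := by
                rw [hrw1, hexpair_char, hd]
                simp [hha, hhb]
              simp [hexstring_py, hexstring_py_alt, hnl, ha, hsharp, hslice, hd, hpair,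
                hexRunB, isHexB_eq, hha, hhb]
          · have hpair : hexpair_py value.toList ((n:Int)+1) = (none, ((n+1:Nat) : Int)) := by
              rw [hrw1, hexpair_char, hd]
              simp [hha]
            simp [hexstring_py, hexstring_py_alt, hnl, ha, hsharp, hslice, hd, hpair,
              hexRunB, isHexB_eq, hha]
    · simp [hexstring_py, hexstring_py_alt, hnl, ha, hsharp]
-- ===== VERDICT (by name: the statement is the Claim_ definition above) =====
theorem hexstring_py_spec : Claim_equal_hexstring_py := by
  intro value i _ hpre
  exact main value i hpre
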